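-- pv_equiv track=rewrite | github.com/angsio/180-labs | Solutions/Lab-5/Q4.py | list1_sw_list2
-- ===== SOURCE A (Python) =====
-- def list1_sw_list2(L1, L2):
--     if len(L2) > len(L1):
--         return False
--     else:
--         for i in range(len(L2)):
--             if L2[i] == L1[i]:
--                 pass
--             else:
--                 return False
--         return True
-- ===== SOURCE B (Python) =====
-- def list1_sw_list2(L1, L2):
--     return L1[:len(L2)] == L2
-- ===== Notes on version B (the rewrite author's own statement) =====
-- stated objective: idiomatic
-- what changed: Replaces the length guard plus index loop with a single closed-form expression comparing the prefix slice L1[:len(L2)] to L2.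
import Mathlib
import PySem

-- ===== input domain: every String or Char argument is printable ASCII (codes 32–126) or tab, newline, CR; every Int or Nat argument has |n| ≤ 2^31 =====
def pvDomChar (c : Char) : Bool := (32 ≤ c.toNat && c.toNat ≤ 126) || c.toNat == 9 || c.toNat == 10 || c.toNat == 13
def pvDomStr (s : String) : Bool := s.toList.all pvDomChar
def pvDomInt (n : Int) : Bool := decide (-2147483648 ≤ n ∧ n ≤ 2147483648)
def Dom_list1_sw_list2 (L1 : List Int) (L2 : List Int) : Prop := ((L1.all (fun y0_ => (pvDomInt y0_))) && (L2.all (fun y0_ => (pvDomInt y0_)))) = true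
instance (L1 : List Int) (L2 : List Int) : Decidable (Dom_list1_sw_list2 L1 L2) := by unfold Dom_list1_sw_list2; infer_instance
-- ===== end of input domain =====

-- ===== PORT A =====
-- loop body of A: for i in range(len(L2)): if L2[i] == L1[i]: pass else: return False
def pvALoop (L1 L2 : List Int) : List Int → Bool
  | [] => true
  | i :: rest =>
    if PySem.List.pyGet? L2 i == PySem.List.pyGet? L1 i then pvALoop L1 L2 rest
    else false

def list1_sw_list2 (L1 : List Int) (L2 : List Int) : Bool :=
  if (L2.length : Int) > (L1.length : Int) then false
  else pvALoop L1 L2 (PySem.List.pyRange 0 (L2.length : Int) 1)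

-- ===== PORT B =====
-- B: return L1[:len(L2)] == L2
def list1_sw_list2_alt (L1 : List Int) (L2 : List Int) : Bool :=
  PySem.List.slice L1 none (some (L2.length : Int)) == L2

-- ===== PRECONDITION & SPEC =====
def Spec_list1_sw_list2 (L1 : List Int) (L2 : List Int) (out : Bool) : Prop := out = list1_sw_list2_alt L1 L2
instance (L1 : List Int) (L2 : List Int) (out : Bool) : Decidable (Spec_list1_sw_list2 L1 L2 out) := by unfold Spec_list1_sw_list2; infer_instance

-- ===== CLAIM (what is proved, stated in full; the proofs are below) =====
def Claim_equal_list1_sw_list2 : Prop := ∀ (L1 : List Int) (L2 : List Int), Dom_list1_sw_list2 L1 L2 → Spec_list1_sw_list2 L1 L2 (list1_sw_list2 L1 L2)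

-- ===== LEMMAS AND PROOFS =====

-- ===== VERDICT (by name: the statement is the Claim_ definition above) =====
theorem pvALoop_range (L1 L2 : List Int) (n : Nat) (h : n ≤ L2.length) :
    pvALoop L1 L2 (PySem.List.pyRange ((L2.length - n : Nat) : Int) (L2.length : Int) 1)
      = decide (∀ j : Nat, L2.length - n ≤ j → j < L2.length → L1[j]? = L2[j]?) := by
  induction n with
  | zero =>
    rw [show PySem.List.pyRange ((L2.length - 0 : Nat) : Int) (L2.length : Int) 1 = [] by
      simp [PySem.List.pyRange]]
    simp [pvALoop]
    intro j hj hj'; omega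
  | succ k ih =>
    have hlt : ((L2.length - (k+1) : Nat) : Int) < (L2.length : Int) := by
      omega
    rw [PySem.List.pyRange_one_cons hlt]
    have hstep : ((L2.length - (k+1) : Nat) : Int) + 1 = ((L2.length - k : Nat) : Int) := by
      omega
    rw [hstep]
    simp only [pvALoop]
    rw [ih (by omega)]
    rw [PySem.List.pyGet?_natCast, PySem.List.pyGet?_natCast]
    by_cases he : L2[(L2.length - (k+1) : Nat)]? = L1[(L2.length - (k+1) : Nat)]?
    · rw [if_pos (by simp [he])]
      apply decide_eq_decide.mpr
      constructor
      · intro hall j hj hj'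
        rcases Nat.eq_or_lt_of_le hj with rfl | hjlt
        · exact he.symm
        · exact hall j (by omega) hj'
      · intro hall j hj hj'
        exact hall j (by omega) hj'
    · rw [if_neg (by simpa using he)]
      have hno : ¬ (∀ j : Nat, L2.length - (k+1) ≤ j → j < L2.length → L1[j]? = L2[j]?) := by
        intro hall
        exact he ((hall (L2.length - (k+1)) le_rfl (by omega)).symm)
      exact (decide_eq_false hno).symm

theorem list1_sw_list2_spec : Claim_equal_list1_sw_list2 := by
  intro L1 L2 _
  unfold Spec_list1_sw_list2 list1_sw_list2 list1_sw_list2_alt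
  rw [PySem.List.slice_to_natCast]
  by_cases hlen : (L2.length : Int) > (L1.length : Int)
  · rw [if_pos hlen]
    have : L1.take L2.length ≠ L2 := by
      intro heq
      have := congrArg List.length heq
      simp [List.length_take] at this
      omega
    simp [this]
  · rw [if_neg hlen]
    have := pvALoop_range L1 L2 L2.length le_rfl
    rw [Nat.sub_self] at this
    rw [show ((0:Nat):Int) = (0:Int) by simp] at this
    rw [this]
    have : (L1.take L2.length = L2) ↔ (∀ j : Nat, 0 ≤ j → j < L2.length → L1[j]? = L2[j]?) := by
      constructor
      · intro heq j _ hj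
        have : (L1.take L2.length)[j]? = L2[j]? := by rw [heq]
        rwa [List.getElem?_take_of_lt hj] at this
      · intro hall
        apply List.ext_getElem?
        intro j
        by_cases hj : j < L2.length
        · rw [List.getElem?_take_of_lt hj]; exact hall j (Nat.zero_le _) hj
        · rw [List.getElem?_eq_none (by simp [List.length_take]; omega),
              List.getElem?_eq_none (by omega)]
    rw [show (0:Int) = ((0:Nat):Int) by simp] at *
    by_cases hp : L1.take L2.length = L2
    · simp [hp]
      intro j hj
      exact this.mp hp j (Nat.zero_le _) hj
    · have hno : ¬ (∀ j : Nat, 0 ≤ j → j < L2.length → L1[j]? = L2[j]?) :=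
        (not_iff_not.mpr this).mp hp
      rw [decide_eq_false hno]
      simp [hp]
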